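-- pv_equiv track=rewrite | github.com/An-Moon/Aesthetic-evaluation | eval_text_stats.py | match_categories
-- ===== SOURCE A (Python) =====
-- def match_categories(text, words_set, keywords_dict, semantic_triggers):
--     text_lower = text.lower()
--     keyword_matched = set()
--
--     for category, kw_list in keywords_dict.items():
--         for kw in kw_list:
--             if " " in kw:
--                 if kw in text_lower:
--                     keyword_matched.add(category)
--                     break
--             else:
--                 if kw in words_set:
--                     keyword_matched.add(category)
--                     break
--
--     trigger_matched = set(keyword_matched)
--     for category, trigger_list in semantic_triggers.items():
--         for trigger in trigger_list:
--             if trigger in text_lower: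
--                 trigger_matched.add(category)
--                 break
--
--     return keyword_matched, trigger_matched
-- ===== SOURCE B (Python) =====
-- def match_categories(text, words_set, keywords_dict, semantic_triggers):
--     text_lower = text.lower()
--
--     # Split all keyword patterns by kind in one flattening pass.
--     singles = []   # (kw, category) for single-word patterns
--     multi = []     # (category, kw) for multiword patterns
--     for category, kw_list in keywords_dict.items():
--         for kw in kw_list:
--             if " " in kw:
--                 multi.append((category, kw))
--             else:
--                 singles.append((kw, category))
--
--     # Reverse index: word -> categories, so each word of the text is one lookup.
--     index = {}
--     for kw, category in singles:
--         index.setdefault(kw, []).append(category)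
--
--     hit = set()
--     for w in words_set:
--         hit.update(index.get(w, []))
--     for category, kw in multi:
--         if category not in hit and kw in text_lower:
--             hit.add(category)
--
--     keyword_matched = {c for c in keywords_dict if c in hit}
--
--     trigger_matched = set(keyword_matched)
--     for category, trigger_list in semantic_triggers.items():
--         if any(t in text_lower for t in trigger_list):
--             trigger_matched.add(category)
--
--     return keyword_matched, trigger_matched
-- ===== Notes on version B (the rewrite author's own statement) =====
-- stated objective: alternative
-- what changed: Replaces A's per-category nested scan with one flattening pass that splits patterns by kind, a reverse index word->categories so single-word matching becomes one dict lookup per word of the text, a guarded pass over the multiword patterns, and a final filter of the category keys.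
import Mathlib
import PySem

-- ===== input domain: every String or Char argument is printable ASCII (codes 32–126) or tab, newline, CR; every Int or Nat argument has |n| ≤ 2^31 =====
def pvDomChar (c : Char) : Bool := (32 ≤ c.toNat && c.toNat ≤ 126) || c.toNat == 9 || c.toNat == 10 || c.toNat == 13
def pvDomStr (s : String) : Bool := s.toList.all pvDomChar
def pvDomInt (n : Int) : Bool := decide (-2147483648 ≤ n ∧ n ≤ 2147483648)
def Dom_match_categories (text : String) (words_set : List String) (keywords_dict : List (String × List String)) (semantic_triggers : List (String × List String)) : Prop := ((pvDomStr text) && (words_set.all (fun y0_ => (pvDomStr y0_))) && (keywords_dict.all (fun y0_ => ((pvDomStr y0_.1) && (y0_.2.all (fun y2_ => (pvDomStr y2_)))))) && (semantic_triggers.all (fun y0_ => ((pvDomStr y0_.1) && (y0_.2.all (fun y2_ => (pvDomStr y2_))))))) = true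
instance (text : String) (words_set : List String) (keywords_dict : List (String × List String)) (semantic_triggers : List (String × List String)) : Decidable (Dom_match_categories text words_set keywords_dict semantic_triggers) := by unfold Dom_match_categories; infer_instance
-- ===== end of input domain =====

-- B rebuilds the matching via a flattening pass, a reverse word->categories index and a
-- final filter of the category keys instead of A's per-category nested scans (alternative).

-- ===== PORT A =====
-- inner 'for kw in kw_list: … break' of the keyword loop
def pvAKw (tl : String) (ws : List String) (cat : String) (s : PySem.Set String) : List String → PySem.Set String
  | [] => s
  | kw :: rest =>
      if PySem.Str.isIn " " kw then
        if PySem.Str.isIn kw tl then PySem.Set.add s cat else pvAKw tl ws cat s rest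
      else
        if PySem.Set.contains ws kw then PySem.Set.add s cat else pvAKw tl ws cat s rest

-- inner 'for trigger in trigger_list: … break' of the trigger loop
def pvATr (tl : String) (cat : String) (s : PySem.Set String) : List String → PySem.Set String
  | [] => s
  | t :: rest =>
      if PySem.Str.isIn t tl then PySem.Set.add s cat else pvATr tl cat s rest

def match_categories (text : String) (words_set : List String) (keywords_dict : List (String × List String)) (semantic_triggers : List (String × List String)) : List String × List String :=
  let tl := PySem.Str.lower text
  let km := (PySem.Dict.ofList keywords_dict).items.foldl
      (fun s p => pvAKw tl words_set p.1 s p.2) PySem.Set.empty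
  let tm := (PySem.Dict.ofList semantic_triggers).items.foldl
      (fun s p => pvATr tl p.1 s p.2) (PySem.Set.ofList km)
  (km, tm)

-- ===== PORT B =====
-- inner 'for kw in kw_list: (multi if " " in kw else singles).append(…)'
def pvBSplitInner (cat : String) (kws : List String)
    (acc : List (String × String) × List (String × String)) :
    List (String × String) × List (String × String) :=
  kws.foldl (fun acc kw =>
      if PySem.Str.isIn " " kw then (acc.1, acc.2 ++ [(cat, kw)])
      else (acc.1 ++ [(kw, cat)], acc.2)) acc

def match_categories_alt (text : String) (words_set : List String) (keywords_dict : List (String × List String)) (semantic_triggers : List (String × List String)) : List String × List String :=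
  let tl := PySem.Str.lower text
  let kitems := (PySem.Dict.ofList keywords_dict).items
  let sm := kitems.foldl (fun acc p => pvBSplitInner p.1 p.2 acc) ([], [])
  -- index.setdefault(kw, []).append(category)
  let index := sm.1.foldl (fun d q => d.modify q.1 [] (fun xs => xs ++ [q.2])) PySem.Dict.empty
  -- hit.update(index.get(w, []))
  let hit1 := words_set.foldl (fun s w => PySem.Set.update s (index.getD w [])) PySem.Set.empty
  -- guarded pass over the multiword patterns
  let hit := sm.2.foldl (fun s q =>
      if !PySem.Set.contains s q.1 && PySem.Str.isIn q.2 tl then PySem.Set.add s q.1 else s) hit1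
  let km := PySem.Set.ofList ((kitems.map (fun p => p.1)).filter (fun c => PySem.Set.contains hit c))
  let tm := (PySem.Dict.ofList semantic_triggers).items.foldl
      (fun s p => if p.2.any (fun t => PySem.Str.isIn t tl) then PySem.Set.add s p.1 else s)
      (PySem.Set.ofList km)
  (km, tm)

-- ===== PRECONDITION & SPEC =====
def Spec_match_categories (text : String) (words_set : List String) (keywords_dict : List (String × List String)) (semantic_triggers : List (String × List String)) (out : List String × List String) : Prop := out = match_categories_alt text words_set keywords_dict semantic_triggers
instance (text : String) (words_set : List String) (keywords_dict : List (String × List String)) (semantic_triggers : List (String × List String)) (out : List String × List String) : Decidable (Spec_match_categories text words_set keywords_dict semantic_triggers out) := by unfold Spec_match_categories; infer_instance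

-- ===== CLAIM (what is proved, stated in full; the proofs are below) =====
def Claim_equal_match_categories : Prop := ∀ (text : String) (words_set : List String) (keywords_dict : List (String × List String)) (semantic_triggers : List (String × List String)), Dom_match_categories text words_set keywords_dict semantic_triggers → Spec_match_categories text words_set keywords_dict semantic_triggers (match_categories text words_set keywords_dict semantic_triggers)

-- ===== LEMMAS AND PROOFS =====

-- the per-keyword test both programs implement
def pvMatchF (tl : String) (ws : List String) (kw : String) : Bool :=
  if PySem.Str.isIn " " kw then PySem.Str.isIn kw tl else PySem.Set.contains ws kw

theorem pvAKw_eq (tl : String) (ws : List String) (cat : String) (kws : List String)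
    (s : PySem.Set String) :
    pvAKw tl ws cat s kws = if kws.any (pvMatchF tl ws) then PySem.Set.add s cat else s := by
  induction kws with
  | nil => simp [pvAKw]
  | cons kw rest ih =>
      simp only [pvAKw, List.any_cons, ih]
      cases h1 : PySem.Str.isIn " " kw with
      | true =>
          cases h2 : PySem.Str.isIn kw tl <;>
            (simp at h1 h2; simp [pvMatchF, h1, h2])
      | false =>
          cases h2 : PySem.Set.contains ws kw <;>
            (simp at h1 h2; simp [pvMatchF, h1, h2])

theorem pvATr_eq (tl : String) (cat : String) (ts : List String) (s : PySem.Set String) :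
    pvATr tl cat s ts = if ts.any (fun t => PySem.Str.isIn t tl) then PySem.Set.add s cat else s := by
  induction ts with
  | nil => simp [pvATr]
  | cons t rest ih =>
      simp only [pvATr, List.any_cons, ih]
      by_cases h : PySem.Str.isIn t tl = true
      · simp at h; simp [h]
      · simp at h; simp [h]

-- fold of "if g p then add s p.1 else s" over items with distinct keys
theorem pvFoldAddIf {α : Type} (g : String × α → Bool) :
    ∀ (items : List (String × α)) (s : PySem.Set String),
      (items.map Prod.fst).Nodup →
      items.foldl (fun s p => if g p then PySem.Set.add s p.1 else s) s
        = s ++ ((items.filter g).map Prod.fst).filter (fun c => !PySem.Set.contains s c)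
  | [], s, _ => by simp
  | (k, v) :: rest, s, hnd => by
      rw [List.map_cons, List.nodup_cons] at hnd
      have hk : k ∉ rest.map Prod.fst := hnd.1
      have hnd' : (rest.map Prod.fst).Nodup := hnd.2
      have hsub : ∀ c ∈ (rest.filter g).map Prod.fst, c ≠ k := by
        intro c hc
        rcases List.mem_map.mp hc with ⟨p, hp, rfl⟩
        intro h
        exact hk (h ▸ List.mem_map_of_mem (List.mem_of_mem_filter hp))
      simp only [List.foldl_cons]
      by_cases hg : g (k, v) = true
      · by_cases hks : k ∈ s
        · rw [if_pos hg, PySem.Set.add_of_mem hks, pvFoldAddIf g rest s hnd']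
          simp [hg, hks]
        · rw [if_pos hg, PySem.Set.add_of_not_mem hks, pvFoldAddIf g rest (s ++ [k]) hnd']
          have hcong : ((rest.filter g).map Prod.fst).filter (fun c => !PySem.Set.contains (s ++ [k]) c)
              = ((rest.filter g).map Prod.fst).filter (fun c => !PySem.Set.contains s c) := by
            apply List.filter_congr
            intro c hc
            have hck := hsub c hc
            simp [PySem.Set.contains_eq_listContains, hck]
          rw [hcong]
          simp [hg, PySem.Set.contains_eq_listContains, hks]
      · rw [if_neg hg, pvFoldAddIf g rest s hnd']
        simp [hg]

theorem pvSplitInner_eq (cat : String) (kws : List String) :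
    ∀ (acc : List (String × String) × List (String × String)),
    pvBSplitInner cat kws acc =
      (acc.1 ++ (kws.filter (fun kw => !PySem.Str.isIn " " kw)).map (fun kw => (kw, cat)),
       acc.2 ++ (kws.filter (fun kw => PySem.Str.isIn " " kw)).map (fun kw => (cat, kw))) := by
  induction kws with
  | nil => intro acc; simp [pvBSplitInner]
  | cons kw rest ih =>
      intro acc
      simp only [pvBSplitInner, List.foldl_cons] at *
      by_cases h : PySem.Str.isIn " " kw = true
      · simp at h
        rw [ih]; simp [h]
      · simp at h
        rw [ih]; simp [h]

-- the flattened (category, kw) pairs of the keyword dict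
def pvFlat (items : List (String × List String)) : List (String × String) :=
  items.flatMap (fun p => p.2.map (fun kw => (p.1, kw)))

theorem pvSplit_eq (items : List (String × List String)) :
    ∀ (acc : List (String × String) × List (String × String)),
      items.foldl (fun acc p => pvBSplitInner p.1 p.2 acc) acc =
        (acc.1 ++ ((pvFlat items).filter (fun q => !PySem.Str.isIn " " q.2)).map (fun q => (q.2, q.1)),
         acc.2 ++ (pvFlat items).filter (fun q => PySem.Str.isIn " " q.2)) := by
  induction items with
  | nil => intro acc; simp [pvFlat]
  | cons p rest ih =>
      intro acc
      rw [List.foldl_cons, pvSplitInner_eq, ih]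
      simp only [pvFlat, List.flatMap_cons, List.filter_append, List.map_append,
        List.append_assoc, List.filter_map, List.map_map]
      rfl

theorem pvHit1_mem (index : PySem.Dict String (List String)) (ws : List String) (c : String) :
    ∀ s : PySem.Set String,
      (c ∈ ws.foldl (fun s w => PySem.Set.update s (index.getD w [])) s)
        ↔ c ∈ s ∨ ∃ w ∈ ws, c ∈ index.getD w [] := by
  induction ws with
  | nil => intro s; simp
  | cons w rest ih =>
      intro s
      rw [List.foldl_cons, ih]
      simp [PySem.Set.mem_update]
      tauto

theorem pvHit2_mem (tl : String) (multi : List (String × String)) (c : String) :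
    ∀ s : PySem.Set String,
      (c ∈ multi.foldl (fun s q =>
          if !PySem.Set.contains s q.1 && PySem.Str.isIn q.2 tl then PySem.Set.add s q.1 else s) s)
        ↔ c ∈ s ∨ ∃ q ∈ multi, q.1 = c ∧ PySem.Str.isIn q.2 tl := by
  induction multi with
  | nil => intro s; simp
  | cons q rest ih =>
      intro s
      rw [List.foldl_cons]
      by_cases hc : q.1 ∈ s
      · have hct : PySem.Set.contains s q.1 = true := (PySem.Set.contains_iff s q.1).mpr hc
        simp only [hct, Bool.not_true, Bool.false_and, Bool.false_eq_true, if_false]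
        rw [ih]
        constructor
        · rintro (h | ⟨p, hp, h1, h2⟩)
          · exact Or.inl h
          · exact Or.inr ⟨p, List.mem_cons_of_mem q hp, h1, h2⟩
        · rintro (h | ⟨p, hp, h1, h2⟩)
          · exact Or.inl h
          · rcases List.mem_cons.mp hp with rfl | hp'
            · exact Or.inl (h1 ▸ hc)
            · exact Or.inr ⟨p, hp', h1, h2⟩
      · have hcf : PySem.Set.contains s q.1 = false :=
          Bool.eq_false_iff.mpr (fun h => hc ((PySem.Set.contains_iff s q.1).mp h))
        by_cases hm : PySem.Str.isIn q.2 tl = true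
        · simp only [hcf, Bool.not_false, Bool.true_and, hm, if_true]
          rw [PySem.Set.add_of_not_mem hc, ih]
          constructor
          · rintro (h | ⟨p, hp, h1, h2⟩)
            · rcases List.mem_append.mp h with h' | h'
              · exact Or.inl h'
              · have hqc : q.1 = c := (List.mem_singleton.mp h').symm
                exact Or.inr ⟨q, List.mem_cons_self, hqc, hm⟩
            · exact Or.inr ⟨p, List.mem_cons_of_mem q hp, h1, h2⟩
          · rintro (h | ⟨p, hp, h1, h2⟩)
            · exact Or.inl (List.mem_append.mpr (Or.inl h))
            · rcases List.mem_cons.mp hp with rfl | hp'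
              · exact Or.inl (List.mem_append.mpr (Or.inr (List.mem_singleton.mpr h1.symm)))
              · exact Or.inr ⟨p, hp', h1, h2⟩
        · have hmf : PySem.Str.isIn q.2 tl = false := Bool.eq_false_iff.mpr hm
          simp only [hcf, Bool.not_false, Bool.true_and, hmf, Bool.false_eq_true, if_false]
          rw [ih]
          constructor
          · rintro (h | ⟨p, hp, h1, h2⟩)
            · exact Or.inl h
            · exact Or.inr ⟨p, List.mem_cons_of_mem q hp, h1, h2⟩
          · rintro (h | ⟨p, hp, h1, h2⟩)
            · exact Or.inl h
            · rcases List.mem_cons.mp hp with rfl | hp'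
              · exact absurd h2 hm
              · exact Or.inr ⟨p, hp', h1, h2⟩

-- named pieces of the two ports (definitionally equal to the let-bound values)
def pvSM (kitems : List (String × List String)) :
    List (String × String) × List (String × String) :=
  kitems.foldl (fun acc p => pvBSplitInner p.1 p.2 acc) ([], [])

def pvIndex (kitems : List (String × List String)) : PySem.Dict String (List String) :=
  (pvSM kitems).1.foldl (fun d q => d.modify q.1 [] (fun xs => xs ++ [q.2])) PySem.Dict.empty

def pvHit1 (ws : List String) (kitems : List (String × List String)) : PySem.Set String :=
  ws.foldl (fun s w => PySem.Set.update s ((pvIndex kitems).getD w [])) PySem.Set.empty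

def pvHit (tl : String) (ws : List String) (kitems : List (String × List String)) :
    PySem.Set String :=
  (pvSM kitems).2.foldl (fun s q =>
      if !PySem.Set.contains s q.1 && PySem.Str.isIn q.2 tl then PySem.Set.add s q.1 else s)
    (pvHit1 ws kitems)

theorem pvPairMem (S : List (String × String)) (w c : String) :
    c ∈ (S.filter (fun q => q.1 == w)).map (fun q => q.2) ↔ (w, c) ∈ S := by
  simp only [List.mem_map, List.mem_filter, beq_iff_eq]
  constructor
  · rintro ⟨⟨a, b⟩, ⟨hS, rfl⟩, rfl⟩; exact hS
  · intro h; exact ⟨(w, c), ⟨h, rfl⟩, rfl⟩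

theorem pvFlatMem (kitems : List (String × List String)) (a b : String) :
    (a, b) ∈ pvFlat kitems ↔ ∃ p' ∈ kitems, p'.1 = a ∧ b ∈ p'.2 := by
  simp only [pvFlat, List.mem_flatMap, List.mem_map, Prod.mk.injEq]
  constructor
  · rintro ⟨p', hp', kw, hkw, rfl, rfl⟩; exact ⟨p', hp', rfl, hkw⟩
  · rintro ⟨p', hp', rfl, hb⟩; exact ⟨p', hp', b, hb, rfl, rfl⟩

-- the heart: membership in B's 'hit' set is A's per-category test
theorem pvHit_char (tl : String) (ws : List String) (kd : List (String × List String))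
    (p : String × List String) (hp : p ∈ (PySem.Dict.ofList kd).items) :
    PySem.Set.contains (pvHit tl ws (PySem.Dict.ofList kd).items) p.1
      = p.2.any (pvMatchF tl ws) := by
  have hknodup : ((PySem.Dict.ofList kd).keys).Nodup := PySem.Dict.nodup_keys_ofList kd
  have hval : ∀ p' ∈ (PySem.Dict.ofList kd).items, p'.1 = p.1 → p'.2 = p.2 := by
    intro p' hp' he
    have h1 := PySem.Dict.get?_of_mem_items (PySem.Dict.ofList kd) (k := p.1) (v := p.2)
      (by simpa using hp) hknodup
    have h2 := PySem.Dict.get?_of_mem_items (PySem.Dict.ofList kd) (k := p.1) (v := p'.2)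
      (by rw [← he]; simpa using hp') hknodup
    exact Option.some.inj (h2.symm.trans h1)
  have hsm : pvSM (PySem.Dict.ofList kd).items =
      (((pvFlat (PySem.Dict.ofList kd).items).filter (fun q => !PySem.Str.isIn " " q.2)).map
          (fun q => (q.2, q.1)),
       (pvFlat (PySem.Dict.ofList kd).items).filter (fun q => PySem.Str.isIn " " q.2)) := by
    rw [pvSM, pvSplit_eq]; simp
  have hS1 : (pvSM (PySem.Dict.ofList kd).items).1 =
      ((pvFlat (PySem.Dict.ofList kd).items).filter (fun q => !PySem.Str.isIn " " q.2)).map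
        (fun q => (q.2, q.1)) := by rw [hsm]
  have hS2 : (pvSM (PySem.Dict.ofList kd).items).2 =
      (pvFlat (PySem.Dict.ofList kd).items).filter (fun q => PySem.Str.isIn " " q.2) := by
    rw [hsm]
  rw [Bool.eq_iff_iff, PySem.Set.contains_iff, List.any_eq_true]
  rw [pvHit, pvHit2_mem, pvHit1, pvHit1_mem]
  constructor
  · rintro ((h | ⟨w, hw, hmem⟩) | ⟨q, hq, h1, h2⟩)
    · simp [PySem.Set.empty] at h
    · rw [pvIndex, hS1, PySem.Dict.getD_foldl_modify_append, PySem.Dict.getD_empty,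
        List.nil_append, pvPairMem] at hmem
      rcases List.mem_map.mp hmem with ⟨q, hq, hqe⟩
      have hqf := List.mem_of_mem_filter hq
      have hqs : PySem.Str.isIn " " q.2 = false := by
        have h := (List.mem_filter.mp hq).2
        simpa using h
      have hq2 : q.2 = w := congrArg Prod.fst hqe
      have hq1 : q.1 = p.1 := congrArg Prod.snd hqe
      have hqpair : (q.1, q.2) ∈ pvFlat (PySem.Dict.ofList kd).items := by simpa using hqf
      rcases (pvFlatMem _ _ _).mp hqpair with ⟨p', hp', he, hb⟩
      have hv := hval p' hp' (he.trans hq1)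
      have hnsp : ¬ (PySem.Str.isIn " " w = true) := by
        rw [← hq2]; exact Bool.eq_false_iff.mp hqs
      refine ⟨w, hq2 ▸ hv ▸ hb, ?_⟩
      simp only [pvMatchF]
      rw [if_neg hnsp]
      exact (PySem.Set.contains_iff ws w).mpr hw
    · rw [hS2] at hq
      have hqf := List.mem_of_mem_filter hq
      have hqs : PySem.Str.isIn " " q.2 = true := (List.mem_filter.mp hq).2
      have hqpair : (q.1, q.2) ∈ pvFlat (PySem.Dict.ofList kd).items := by simpa using hqf
      rcases (pvFlatMem _ _ _).mp hqpair with ⟨p', hp', he, hb⟩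
      have hv := hval p' hp' (he.trans h1)
      refine ⟨q.2, hv ▸ hb, ?_⟩
      simp only [pvMatchF]
      rw [if_pos hqs]
      exact h2
  · rintro ⟨kw, hkw, hm⟩
    by_cases hs : PySem.Str.isIn " " kw = true
    · have hm' : PySem.Str.isIn kw tl = true := by
        simp only [pvMatchF] at hm; rw [if_pos hs] at hm; exact hm
      refine Or.inr ⟨(p.1, kw), ?_, rfl, hm'⟩
      rw [hS2]
      exact List.mem_filter.mpr ⟨(pvFlatMem _ _ _).mpr ⟨p, hp, rfl, hkw⟩, hs⟩
    · have hm' : PySem.Set.contains ws kw = true := by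
        simp only [pvMatchF] at hm; rw [if_neg hs] at hm; exact hm
      have hsf : PySem.Str.isIn " " kw = false := Bool.eq_false_iff.mpr hs
      refine Or.inl (Or.inr ⟨kw, (PySem.Set.contains_iff ws kw).mp hm', ?_⟩)
      rw [pvIndex, hS1, PySem.Dict.getD_foldl_modify_append, PySem.Dict.getD_empty,
        List.nil_append, pvPairMem]
      refine List.mem_map.mpr ⟨(p.1, kw), ?_, rfl⟩
      refine List.mem_filter.mpr ⟨(pvFlatMem _ _ _).mpr ⟨p, hp, rfl, hkw⟩, ?_⟩
      rw [Bool.not_eq_eq_eq_not]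
      simpa using hsf

-- the two keyword-matched sets coincide
theorem pvKm_eq (tl : String) (ws : List String) (kd : List (String × List String)) :
    (PySem.Dict.ofList kd).items.foldl (fun s p => pvAKw tl ws p.1 s p.2) PySem.Set.empty
      = PySem.Set.ofList (((PySem.Dict.ofList kd).items.map (fun p => p.1)).filter
          (fun c => PySem.Set.contains (pvHit tl ws (PySem.Dict.ofList kd).items) c)) := by
  have hnd : ((PySem.Dict.ofList kd).items.map Prod.fst).Nodup := by
    have h := PySem.Dict.nodup_keys_ofList (κ := String) (ν := List String) kd
    simpa [PySem.Dict.keys] using h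
  -- A's side: fold of conditional adds over distinct keys
  have hA : (PySem.Dict.ofList kd).items.foldl (fun s p => pvAKw tl ws p.1 s p.2) PySem.Set.empty
      = (((PySem.Dict.ofList kd).items.filter (fun p => p.2.any (pvMatchF tl ws))).map Prod.fst) := by
    simp only [pvAKw_eq]
    rw [pvFoldAddIf (fun p => p.2.any (pvMatchF tl ws)) _ _ hnd]
    simp [PySem.Set.empty, PySem.Set.contains_eq_listContains]
  -- B's side: filter of the keys through the hit set
  have hB : ((PySem.Dict.ofList kd).items.map (fun p => p.1)).filter
        (fun c => PySem.Set.contains (pvHit tl ws (PySem.Dict.ofList kd).items) c)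
      = (((PySem.Dict.ofList kd).items.filter (fun p => p.2.any (pvMatchF tl ws))).map Prod.fst) := by
    rw [List.filter_map]
    congr 1
    apply List.filter_congr
    intro p hp
    exact pvHit_char tl ws kd p hp
  rw [hA, hB]
  rw [PySem.Set.ofList_eq_self_of_nodup]
  exact hnd.sublist (List.Sublist.map Prod.fst List.filter_sublist)

-- ===== VERDICT (by name: the statement is the Claim_ definition above) =====
theorem match_categories_spec : Claim_equal_match_categories := by
  intro text ws kd st _
  unfold Spec_match_categories match_categories match_categories_alt
  dsimp only
  have hkm := pvKm_eq (PySem.Str.lower text) ws kd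
  simp only [pvHit, pvHit1, pvIndex, pvSM] at hkm
  simp only [pvATr_eq]
  rw [hkm]
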